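-- pv_equiv track=rewrite | github.com/ResonanceEnergy/DUBFORGE | engine/phase_one.py | _select_morph_frames
-- ===== SOURCE A (Python) =====
-- from typing import TYPE_CHECKING, Any
--
-- _STEM_GROUP_MAP: dict[str, str] = {
--     "sub_bass": "bass", "mid_bass": "bass", "neuro": "bass",
--     "wobble": "bass", "riddim": "bass",
--     "lead": "lead", "chords": "lead", "arps": "lead", "supersaw": "lead",
--     "pad": "pad",
-- }
--
-- def _select_morph_frames(
--     stem_name: str, morph_wts: dict[str, list[Any]],
-- ) -> list | None:
--     """Select morph frames for a stem from S3E morphs."""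
--     if not morph_wts:
--         return None
--
--     group = _STEM_GROUP_MAP.get(stem_name, "lead")
--     prefs = (
--         ["fractal", "spectral_crush", "phi_spline"]
--         if group == "bass"
--         else ["spectral_blend", "formant", "phi_spline"]
--     )
--
--     for pref in prefs:
--         for morph_name, frames in morph_wts.items():
--             if pref in morph_name.lower():
--                 return frames
--
--     # Fallback: first available
--     for frames in morph_wts.values():
--         return frames
--     return None
-- ===== SOURCE B (Python) =====
-- _STEM_GROUP_MAP: dict[str, str] = {
--     "sub_bass": "bass", "mid_bass": "bass", "neuro": "bass",
--     "wobble": "bass", "riddim": "bass",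
--     "lead": "lead", "chords": "lead", "arps": "lead", "supersaw": "lead",
--     "pad": "pad",
-- }
--
-- def _select_morph_frames(stem_name, morph_wts):
--     """Single pass: rank each morph by the first matching preference, keep the strict minimum."""
--     if not morph_wts:
--         return None
--
--     group = _STEM_GROUP_MAP.get(stem_name, "lead")
--     prefs = (
--         ["fractal", "spectral_crush", "phi_spline"]
--         if group == "bass"
--         else ["spectral_blend", "formant", "phi_spline"]
--     )
--
--     def rank(name):
--         low = name.lower()
--         for i, p in enumerate(prefs):
--             if p in low:
--                 return i
--         return len(prefs)
--
--     best_rank = len(prefs)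
--     best = None
--     for morph_name, frames in morph_wts.items():
--         r = rank(morph_name)
--         if r < best_rank:
--             best_rank, best = r, frames
--     if best_rank < len(prefs):
--         return best
--     return next(iter(morph_wts.values()))
-- ===== Notes on version B (the rewrite author's own statement) =====
-- stated objective: alternative
-- what changed: Replaced the nested prefs-outer/items-inner rescan (plus separate fallback loop) by one pass over morph_wts.items() that computes each item's first-matching-preference rank and keeps the item with the strictly smallest rank, falling back to the first value when no rank beats len(prefs).
import Mathlib
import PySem

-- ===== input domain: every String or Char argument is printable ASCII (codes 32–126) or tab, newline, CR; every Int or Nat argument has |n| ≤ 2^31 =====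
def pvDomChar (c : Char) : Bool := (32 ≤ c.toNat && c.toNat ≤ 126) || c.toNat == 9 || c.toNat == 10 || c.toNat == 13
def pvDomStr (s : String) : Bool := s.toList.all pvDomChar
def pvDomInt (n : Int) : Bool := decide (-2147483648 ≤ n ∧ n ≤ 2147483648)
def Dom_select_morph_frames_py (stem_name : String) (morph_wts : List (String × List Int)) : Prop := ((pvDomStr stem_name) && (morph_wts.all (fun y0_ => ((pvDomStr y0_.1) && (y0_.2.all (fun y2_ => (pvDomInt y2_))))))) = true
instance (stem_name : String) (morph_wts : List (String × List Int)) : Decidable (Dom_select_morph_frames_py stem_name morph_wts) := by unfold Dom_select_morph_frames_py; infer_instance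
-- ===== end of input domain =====

-- B replaces A's nested prefs-outer/items-inner scans by ONE pass over the items keeping the
-- item of strictly smallest preference rank (objective: alternative decomposition, same cost class).

-- ===== PORT A =====
def pvStemGroupMap : PySem.Dict String String := PySem.Dict.ofList
  [("sub_bass", "bass"), ("mid_bass", "bass"), ("neuro", "bass"),
   ("wobble", "bass"), ("riddim", "bass"),
   ("lead", "lead"), ("chords", "lead"), ("arps", "lead"), ("supersaw", "lead"),
   ("pad", "pad")]

-- inner loop: first item whose lowered name contains pref
def pvFindPref (pref : String) : List (String × List Int) → Option (List Int)
  | [] => none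
  | (morph_name, frames) :: rest =>
    if PySem.Str.isIn pref (PySem.Str.lower morph_name) then some frames
    else pvFindPref pref rest

-- outer loop over prefs
def pvLoopA (prefs : List String) (items : List (String × List Int)) : Option (List Int) :=
  match prefs with
  | [] => none
  | pref :: rest =>
    match pvFindPref pref items with
    | some frames => some frames
    | none => pvLoopA rest items

def select_morph_frames_py (stem_name : String) (morph_wts : List (String × List Int)) : Option (List Int) :=
  let items := (PySem.Dict.ofList morph_wts).items
  if items.isEmpty then none
  else
    let group := pvStemGroupMap.getD stem_name "lead"
    let prefs := if group = "bass" then ["fractal", "spectral_crush", "phi_spline"]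
                 else ["spectral_blend", "formant", "phi_spline"]
    match pvLoopA prefs items with
    | some frames => some frames
    | none => (items.head?).map (·.2)   -- "for frames in morph_wts.values(): return frames" / return None

-- ===== PORT B =====
-- rank(name): index of the first pref contained in name.lower(), len(prefs) if none
def pvRank (prefs : List String) (name : String) : Nat :=
  match prefs with
  | [] => 0
  | p :: ps => if PySem.Str.isIn p (PySem.Str.lower name) then 0 else pvRank ps name + 1

def select_morph_frames_py_alt (stem_name : String) (morph_wts : List (String × List Int)) : Option (List Int) :=
  let items := (PySem.Dict.ofList morph_wts).items
  if items.isEmpty then none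
  else
    let group := pvStemGroupMap.getD stem_name "lead"
    let prefs := if group = "bass" then ["fractal", "spectral_crush", "phi_spline"]
                 else ["spectral_blend", "formant", "phi_spline"]
    let res := items.foldl
      (fun s it =>
        let r := pvRank prefs it.1
        if r < s.1 then (r, some it.2) else s)
      (prefs.length, (none : Option (List Int)))
    if res.1 < prefs.length then res.2 else (items.head?).map (·.2)

-- ===== PRECONDITION & SPEC =====
def Spec_select_morph_frames_py (stem_name : String) (morph_wts : List (String × List Int)) (out : Option (List Int)) : Prop := out = select_morph_frames_py_alt stem_name morph_wts
instance (stem_name : String) (morph_wts : List (String × List Int)) (out : Option (List Int)) : Decidable (Spec_select_morph_frames_py stem_name morph_wts out) := by unfold Spec_select_morph_frames_py; infer_instance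

-- ===== CLAIM (what is proved, stated in full; the proofs are below) =====
def Claim_equal_select_morph_frames_py : Prop := ∀ (stem_name : String) (morph_wts : List (String × List Int)), Dom_select_morph_frames_py stem_name morph_wts → Spec_select_morph_frames_py stem_name morph_wts (select_morph_frames_py stem_name morph_wts)

-- ===== LEMMAS AND PROOFS =====

-- canonical right-fold: (minimal rank over items, frames of the leftmost item attaining it)
def pvCanon (prefs : List String) : List (String × List Int) → Nat × Option (List Int)
  | [] => (prefs.length, none)
  | it :: rest =>
    let s := pvCanon prefs rest
    let r := pvRank prefs it.1
    if r ≤ s.1 then (r, some it.2) else s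

theorem pvRank_le (prefs : List String) (name : String) : pvRank prefs name ≤ prefs.length := by
  induction prefs with
  | nil => simp [pvRank]
  | cons p ps ih =>
    simp only [pvRank, List.length_cons]
    split
    · omega
    · omega

theorem pvCanon_le (prefs : List String) (items : List (String × List Int)) :
    (pvCanon prefs items).1 ≤ prefs.length := by
  induction items with
  | nil => simp [pvCanon]
  | cons it rest ih =>
    simp only [pvCanon]
    split
    · exact pvRank_le prefs it.1
    · exact ih

theorem pvFold_char (prefs : List String) (items : List (String × List Int)) :
    ∀ (br : Nat) (best : Option (List Int)), br ≤ prefs.length →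
    items.foldl (fun s it => let r := pvRank prefs it.1; if r < s.1 then (r, some it.2) else s)
      (br, best)
      = if (pvCanon prefs items).1 < br then pvCanon prefs items else (br, best) := by
  induction items with
  | nil =>
    intro br best hbr
    have h := pvCanon_le prefs ([] : List (String × List Int))
    simp only [pvCanon] at *
    simp only [List.foldl_nil]
    rw [if_neg (by omega)]
  | cons it rest ih =>
    intro br best hbr
    simp only [List.foldl_cons]
    rcases hmr : pvCanon prefs rest with ⟨m, b⟩
    have hmle : m ≤ prefs.length := by have := pvCanon_le prefs rest; rw [hmr] at this; exact this
    simp only [pvCanon, hmr]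
    by_cases hr : pvRank prefs it.1 < br
    · rw [if_pos hr]
      rw [ih (pvRank prefs it.1) (some it.2) (le_trans (le_of_lt (lt_of_lt_of_le hr hbr)) le_rfl)]
      rw [hmr]
      by_cases hle : pvRank prefs it.1 ≤ m
      · rw [if_pos hle, if_neg (by omega), if_pos hr]
      · rw [if_neg hle, if_pos (by omega), if_pos (by omega)]
    · rw [if_neg hr]
      rw [ih br best hbr, hmr]
      by_cases hle : pvRank prefs it.1 ≤ m
      · rw [if_pos hle, if_neg (by omega), if_neg (by omega)]
      · rw [if_neg hle]

theorem pvCanon_of_findPref_some (p : String) (ps : List String)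
    (items : List (String × List Int)) (f : List Int)
    (h : pvFindPref p items = some f) :
    pvCanon (p :: ps) items = (0, some f) := by
  induction items with
  | nil => simp [pvFindPref] at h
  | cons it rest ih =>
    rcases it with ⟨n, fr⟩
    by_cases hin : PySem.Str.isIn p (PySem.Str.lower n) = true
    · simp only [pvFindPref, hin, if_true] at h
      simp only [pvCanon, pvRank, hin, if_true]
      rw [if_pos (Nat.zero_le _)]
      simp [← h]
    · simp only [pvFindPref, hin] at h
      simp only [Bool.false_eq_true, if_false] at h
      simp only [pvCanon, pvRank, hin, Bool.false_eq_true, if_false]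
      rw [ih h, if_neg (by omega)]

theorem pvCanon_of_findPref_none (p : String) (ps : List String)
    (items : List (String × List Int))
    (h : pvFindPref p items = none) :
    pvCanon (p :: ps) items = ((pvCanon ps items).1 + 1, (pvCanon ps items).2) := by
  induction items with
  | nil => simp [pvCanon]
  | cons it rest ih =>
    rcases it with ⟨n, fr⟩
    by_cases hin : PySem.Str.isIn p (PySem.Str.lower n) = true
    · simp only [pvFindPref, hin, if_true] at h
      simp at h
    · simp only [pvFindPref, hin, Bool.false_eq_true, if_false] at h
      simp only [pvCanon, pvRank, hin, Bool.false_eq_true, if_false]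
      rw [ih h]
      rcases hmr : pvCanon ps rest with ⟨m, b⟩
      simp only
      by_cases hle : pvRank ps n ≤ m
      · rw [if_pos (by omega), if_pos hle]
      · rw [if_neg (by omega), if_neg hle]

theorem pvLoopA_char (prefs : List String) (items : List (String × List Int)) :
    pvLoopA prefs items
      = if (pvCanon prefs items).1 < prefs.length then (pvCanon prefs items).2 else none := by
  induction prefs with
  | nil =>
    simp [pvLoopA]
  | cons p ps ih =>
    rcases hf : pvFindPref p items with _ | f
    · rw [pvCanon_of_findPref_none p ps items hf]
      simp only [pvLoopA, hf, List.length_cons]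
      rw [ih]
      by_cases hm : (pvCanon ps items).1 < ps.length
      · rw [if_pos hm, if_pos (by omega)]
      · rw [if_neg hm, if_neg (by omega)]
    · rw [pvCanon_of_findPref_some p ps items f hf]
      simp [pvLoopA, hf]

theorem pvCanon_snd_some (prefs : List String) (items : List (String × List Int))
    (h : items ≠ []) : ∃ f, (pvCanon prefs items).2 = some f := by
  induction items with
  | nil => exact absurd rfl h
  | cons it rest ih =>
    simp only [pvCanon]
    by_cases hle : pvRank prefs it.1 ≤ (pvCanon prefs rest).1
    · exact ⟨it.2, by rw [if_pos hle]⟩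
    · rcases rest with _ | ⟨it2, rest2⟩
      · exfalso
        have h1 := pvRank_le prefs it.1
        simp only [pvCanon] at hle
        omega
      · rcases ih (by simp) with ⟨f, hf⟩
        exact ⟨f, by rw [if_neg hle]; exact hf⟩

-- the shared body equivalence, generalized over the items list and the prefs list
theorem pvBody_eq (prefs : List String) (items : List (String × List Int)) (hne : items ≠ []) :
    (match pvLoopA prefs items with
     | some frames => some frames
     | none => (items.head?).map (·.2))
    = (let res := items.foldl
         (fun s it => let r := pvRank prefs it.1; if r < s.1 then (r, some it.2) else s)
         (prefs.length, (none : Option (List Int)));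
       if res.1 < prefs.length then res.2 else (items.head?).map (·.2)) := by
  have hfold := pvFold_char prefs items prefs.length none le_rfl
  rw [pvLoopA_char prefs items]
  simp only [hfold]
  by_cases hm : (pvCanon prefs items).1 < prefs.length
  · rw [if_pos hm, if_pos hm]
    rcases pvCanon_snd_some prefs items hne with ⟨f, hf⟩
    rw [hf]
    rcases hc : pvCanon prefs items with ⟨m, b⟩
    rw [hc] at hm hf
    simp only at hm
    rw [if_pos hm]
  · rw [if_neg hm, if_neg hm]
    simp

-- ===== VERDICT (by name: the statement is the Claim_ definition above) =====
theorem select_morph_frames_py_spec : Claim_equal_select_morph_frames_py := by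
  intro stem_name morph_wts _
  unfold Spec_select_morph_frames_py select_morph_frames_py select_morph_frames_py_alt
  by_cases he : ((PySem.Dict.ofList morph_wts).items : List (String × List Int)).isEmpty = true
  · simp only [he, if_true]
  · simp only [he, Bool.false_eq_true, if_false]
    exact pvBody_eq _ _ (by simpa [List.isEmpty_iff] using he)
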